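-- pv_equiv track=rewrite | github.com/muckenvi/ProjetInfo | Championnat_ui.py | clubs
-- ===== SOURCE A (Python) =====
-- def clubs(fichier):
--     """Ontraite le fichier texte pour avoir une liste uniquement avec les clubs"""
--     C=[]
--     a = 0
--     for equipes in fichier:
--         effectif = equipes.strip().split(', ')
--         if a % 3 == 0:
--             name = effectif[0]
--             C.append(name)
--         a += 1
--     return C
-- ===== SOURCE B (Python) =====
-- def clubs(fichier):
--     """Ontraite le fichier texte pour avoir une liste uniquement avec les clubs"""
--     lignes = list(fichier)
--     selection = lignes[::3]
--     return [l.strip().split(', ')[0] for l in selection]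
-- ===== Notes on version B (the rewrite author's own statement) =====
-- stated objective: simpler
-- what changed: B replaces A's single counted loop with its a % 3 == 0 test by two staged phases: materialize the lines, stride-select every third line with lignes[::3], then map each selected line to its first ', '-separated field; only selected lines are stripped and split.
import Mathlib
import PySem

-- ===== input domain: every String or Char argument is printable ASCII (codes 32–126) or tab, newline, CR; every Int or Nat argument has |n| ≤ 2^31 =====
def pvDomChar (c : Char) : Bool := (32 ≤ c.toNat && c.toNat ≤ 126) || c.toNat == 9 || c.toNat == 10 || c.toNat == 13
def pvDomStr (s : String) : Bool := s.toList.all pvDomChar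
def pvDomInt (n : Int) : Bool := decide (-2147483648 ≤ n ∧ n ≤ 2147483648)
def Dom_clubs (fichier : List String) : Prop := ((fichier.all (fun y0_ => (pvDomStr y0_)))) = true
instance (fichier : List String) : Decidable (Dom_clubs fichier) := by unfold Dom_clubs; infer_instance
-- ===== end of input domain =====

-- B replaces A's counted loop with its `a % 3 == 0` test by two staged phases: stride-select
-- every third line (lignes[::3]), then map each selected line to its first ', ' field — simpler.

-- equipes.strip().split(', ')[0] / l.strip().split(', ')[0] — identical expression in both Pythons.
-- split? with separator ", " ≠ "" always returns `some` of a nonempty list, so the catch-all is unreachable.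
def pvExtract (l : String) : String :=
  match PySem.Str.split? (PySem.Str.strip l) ", " with
  | some (name :: _) => name
  | _ => ""

-- ===== PORT A =====
-- for-loop over fichier with state (C, a); appends when a % 3 == 0
def clubs (fichier : List String) : List String :=
  (fichier.foldl
    (fun (st : List String × Int) equipes =>
      let C := if st.2 % 3 = 0 then st.1 ++ [pvExtract equipes] else st.1
      (C, st.2 + 1))
    ([], 0)).1

-- ===== PORT B =====
-- phase 1: lignes = list(fichier); phase 2: selection = lignes[::3]; phase 3: comprehension
def clubs_alt (fichier : List String) : List String :=
  let lignes := fichier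
  match PySem.List.slice? lignes none none 3 with
  | some selection => selection.map pvExtract
  | none => []   -- unreachable: step 3 ≠ 0

-- ===== PRECONDITION & SPEC =====
def Spec_clubs (fichier : List String) (out : List String) : Prop := out = clubs_alt fichier
instance (fichier : List String) (out : List String) : Decidable (Spec_clubs fichier out) := by unfold Spec_clubs; infer_instance

-- ===== CLAIM (what is proved, stated in full; the proofs are below) =====
def Claim_equal_clubs : Prop := ∀ (fichier : List String), Dom_clubs fichier → Spec_clubs fichier (clubs fichier)

-- ===== LEMMAS AND PROOFS =====

-- Proof helper: every third element of a list, starting at the first.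
def every3 {α : Type} : List α → List α
  | [] => []
  | x :: rest => x :: every3 (rest.drop 2)
termination_by l => l.length
decreasing_by simp

-- Proof helper: the elements A selects when the counter starts at phase r.
def selPhase : List String → Int → List String
  | [], _ => []
  | x :: rest, r =>
      if r % 3 = 0 then pvExtract x :: selPhase rest (r + 1) else selPhase rest (r + 1)

theorem selPhase_congr (xs : List String) (a b : Int) (h : a % 3 = b % 3) :
    selPhase xs a = selPhase xs b := by
  induction xs generalizing a b with
  | nil => rfl
  | cons x rest ih =>
      simp only [selPhase, h, ih (a + 1) (b + 1) (by omega)]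

theorem foldA_phase (xs : List String) (C : List String) (a : Int) :
    (xs.foldl
      (fun (st : List String × Int) equipes =>
        let C := if st.2 % 3 = 0 then st.1 ++ [pvExtract equipes] else st.1
        (C, st.2 + 1))
      (C, a)).1 = C ++ selPhase xs a := by
  induction xs generalizing C a with
  | nil => simp [selPhase]
  | cons x rest ih =>
      rw [List.foldl_cons]
      show (List.foldl _ (if a % 3 = 0 then C ++ [pvExtract x] else C, a + 1) rest).1 = _
      rw [ih, selPhase]
      split_ifs <;> simp

theorem selPhase_one (xs : List String) :
    selPhase xs 1 = selPhase (xs.drop 2) 0 := by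
  match xs with
  | [] => rfl
  | [x] => simp [selPhase]
  | x :: y :: rest =>
      show selPhase (x :: y :: rest) 1 = selPhase rest 0
      simp only [selPhase]
      norm_num
      exact selPhase_congr rest 3 0 (by norm_num)

theorem selPhase_zero_eq_map_every3 (xs : List String) :
    selPhase xs 0 = (every3 xs).map pvExtract := by
  induction hn : xs.length using Nat.strong_induction_on generalizing xs with
  | _ n ih =>
      match xs with
      | [] => simp [selPhase, every3]
      | x :: rest =>
          show selPhase (x :: rest) 0 = _
          simp only [selPhase, every3]
          norm_num
          rw [selPhase_one,
            ih (rest.drop 2).length (by simp at hn; simp; omega) _ rfl]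

theorem filterMap_three {α : Type} (xs : List α) :
    List.filterMap (fun k : Nat => xs[(3 * (k : Int)).toNat]?) (List.range ((xs.length + 2) / 3))
      = every3 xs := by
  induction hn : xs.length using Nat.strong_induction_on generalizing xs with
  | _ n ih =>
      subst hn
      match xs with
      | [] => simp [every3]
      | x :: rest =>
          have hlen : (rest.drop 2).length = rest.length - 2 := by simp
          have hcount : ((x :: rest).length + 2) / 3 = ((rest.drop 2).length + 2) / 3 + 1 := by
            simp only [hlen, List.length_cons]; omega
          rw [hcount, List.range_succ_eq_map, List.filterMap_cons]
          have h0 : ((x :: rest)[(3 * ((0 : Nat) : Int)).toNat]?) = some x := by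
            norm_num
          rw [h0, List.filterMap_map]
          have hfun : ∀ k ∈ List.range (((rest.drop 2).length + 2) / 3),
              ((fun k : Nat => (x :: rest)[(3 * ((k : Nat) : Int)).toNat]?) ∘ Nat.succ) k
                = (fun k : Nat => (rest.drop 2)[(3 * ((k : Nat) : Int)).toNat]?) k := by
            intro k _
            show ((x :: rest)[(3 * ((k.succ : Nat) : Int)).toNat]?) = (rest.drop 2)[(3 * ((k : Nat) : Int)).toNat]?
            have h1 : (3 * ((k.succ : Nat) : Int)).toNat = 3 * k + 3 := by push_cast; omega
            have h2 : (3 * ((k : Nat) : Int)).toNat = 3 * k := by omega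
            rw [h1, h2, List.getElem?_drop]
            show rest[3 * k + 2]? = rest[2 + 3 * k]?
            ring_nf
          rw [List.filterMap_congr hfun,
            ih (rest.drop 2).length (by simp) _ rfl]
          simp [every3]

theorem slice?_three {α : Type} (xs : List α) :
    PySem.List.slice? xs none none 3 = some (every3 xs) := by
  unfold PySem.List.slice? PySem.List.sliceIndices
  simp only [show ¬((3:Int) < 0) by norm_num, show ¬((3:Int) = 0) by norm_num,
    show ((0:Int) < 3) by norm_num, if_pos, if_false]
  have hcnt : (if 0 < ((xs.length : Int)) then (((xs.length : Int) - 0 + 3 - 1) / 3).toNat else 0)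
      = (xs.length + 2) / 3 := by
    split_ifs with h <;> omega
  rw [hcnt, Option.some_inj,
    List.filterMap_congr (fun k _ => by
      show xs[((0 : Int) + 3 * (k : Int)).toNat]? = xs[(3 * (k : Int)).toNat]?
      norm_num)]
  exact filterMap_three xs

-- ===== VERDICT (by name: the statement is the Claim_ definition above) =====
theorem clubs_spec : Claim_equal_clubs := by
  intro fichier _
  unfold Spec_clubs clubs
  rw [foldA_phase, List.nil_append, selPhase_zero_eq_map_every3]
  simp only [clubs_alt, slice?_three]
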